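-- pv_equiv track=rewrite | github.com/zelo2/iTIMO | benchmark/hint_satis_check.py | rank_buckets
-- ===== SOURCE A (Python) =====
-- from collections import Counter, defaultdict
-- from typing import List, Dict, Any, Tuple, Optional
--
-- def rank_buckets(counts: Dict[str, int]) -> List[frozenset]:
--     """把相同 count 的类放在同一个 bucket，按 count 降序。用于“排序是否变化”的判定（忽略并列内部交换）。"""
--     by_cnt = defaultdict(set)
--     for k, v in counts.items():
--         by_cnt[int(v)].add(k)
--     if not by_cnt:
--         return []
--     levels = sorted(by_cnt.keys(), reverse=True)
--     return [frozenset(by_cnt[c]) for c in levels]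
-- ===== SOURCE B (Python) =====
-- from itertools import groupby
--
-- def rank_buckets(counts):
--     """Sort the items by count descending, then emit one frozenset per consecutive run of equal counts."""
--     ordered = sorted(counts.items(), key=lambda kv: int(kv[1]), reverse=True)
--     return [frozenset(k for k, _ in run)
--             for _, run in groupby(ordered, key=lambda kv: int(kv[1]))]
-- ===== Notes on version B (the rewrite author's own statement) =====
-- stated objective: idiomatic
-- what changed: Replaces A's defaultdict(set) inverted index plus key sort by a single descending sort of the items followed by itertools.groupby over consecutive runs of equal counts.
import Mathlib
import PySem

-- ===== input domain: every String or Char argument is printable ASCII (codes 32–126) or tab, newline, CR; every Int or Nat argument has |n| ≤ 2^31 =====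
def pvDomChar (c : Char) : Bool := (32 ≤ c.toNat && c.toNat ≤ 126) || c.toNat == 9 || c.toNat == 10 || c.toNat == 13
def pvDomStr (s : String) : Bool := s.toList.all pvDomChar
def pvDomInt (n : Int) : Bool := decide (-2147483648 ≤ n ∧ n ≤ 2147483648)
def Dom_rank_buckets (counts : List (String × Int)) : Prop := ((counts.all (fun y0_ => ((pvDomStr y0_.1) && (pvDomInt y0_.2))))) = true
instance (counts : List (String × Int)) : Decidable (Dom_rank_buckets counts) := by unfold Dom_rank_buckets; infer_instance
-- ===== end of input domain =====

-- B replaces A's defaultdict(set) inverted index by sort-descending + consecutive grouping (itertools.groupby); objective: idiomatic.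


-- ===== PORT A =====
-- by_cnt = defaultdict(set); for k, v in counts.items(): by_cnt[int(v)].add(k)  (int(v) = v, v : Int already)
-- if not by_cnt: return []; levels = sorted(by_cnt.keys(), reverse=True); [frozenset(by_cnt[c]) for c in levels]
def rank_buckets (counts : List (String × Int)) : List (List String) :=
  let items := (PySem.Dict.ofList counts).items
  let byCnt : PySem.Dict Int (PySem.Set String) :=
    items.foldl (fun d p => d.modify p.2 PySem.Set.empty (fun s => PySem.Set.add s p.1)) PySem.Dict.empty
  if byCnt.items.isEmpty then []
  else
    let levels := PySem.List.sorted byCnt.keys (fun c => c) true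
    levels.map (fun c => byCnt.getD c PySem.Set.empty)

-- ===== PORT B =====
-- itertools.groupby over the descending-sorted items: one run of equal counts per output bucket
def groupRuns : List (String × Int) → List (List String)
  | [] => []
  | (k, v) :: t =>
      ((k, v) :: t.takeWhile (fun p => p.2 == v)).map (fun p => p.1) ::
      groupRuns (t.dropWhile (fun p => p.2 == v))
  termination_by l => l.length
  decreasing_by
    exact Nat.lt_succ_of_le (List.length_dropWhile_le _ _)

def rank_buckets_alt (counts : List (String × Int)) : List (List String) :=
  groupRuns (PySem.List.sorted (PySem.Dict.ofList counts).items (fun kv => kv.2) true)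

-- ===== PRECONDITION & SPEC =====
def Spec_rank_buckets (counts : List (String × Int)) (out : List (List String)) : Prop := out = rank_buckets_alt counts
instance (counts : List (String × Int)) (out : List (List String)) : Decidable (Spec_rank_buckets counts out) := by unfold Spec_rank_buckets; infer_instance

-- ===== CLAIM (what is proved, stated in full; the proofs are below) =====
def Claim_equal_rank_buckets : Prop := ∀ (counts : List (String × Int)), Dom_rank_buckets counts → Spec_rank_buckets counts (rank_buckets counts)

-- ===== LEMMAS AND PROOFS =====

-- Set.update on a cons whose head occurs nowhere later just carries the head along
theorem update_cons_of_not_mem {α : Type} [BEq α] [LawfulBEq α] (a : α) (s : List α)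
    (m : List α) (h : ∀ x ∈ m, x ≠ a) :
    PySem.Set.update (a :: s) m = a :: PySem.Set.update s m := by
  induction m generalizing s with
  | nil => rfl
  | cons x t ih =>
    have hxa : x ≠ a := h x (by simp)
    have : PySem.Set.add (a :: s) x = a :: PySem.Set.add s x := by
      simp [PySem.Set.add, PySem.Set.contains, hxa]
      split <;> simp
    simp only [PySem.Set.update, List.foldl_cons] at *
    rw [this, ih _ (fun y hy => h y (by simp [hy]))]

-- Set.update s l is a sublist of s ++ l
theorem update_sublist {α : Type} [BEq α] (s : List α) (l : List α) :
    (PySem.Set.update s l).Sublist (s ++ l) := by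
  induction l generalizing s with
  | nil => simp [PySem.Set.update]
  | cons x t ih =>
    simp only [PySem.Set.update, List.foldl_cons] at *
    by_cases hc : PySem.Set.contains s x
    · rw [show PySem.Set.add s x = s from by simp only [PySem.Set.contains] at hc; simp [PySem.Set.add, hc]]
      exact (ih s).trans (List.Sublist.append_left (List.sublist_cons_self x t) s)
    · rw [show PySem.Set.add s x = s ++ [x] from by simp only [PySem.Set.contains] at hc; simp [PySem.Set.add, hc]]
      simpa using ih (s ++ [x])

theorem ofList_sublist {α : Type} [BEq α] (l : List α) : (PySem.Set.ofList l).Sublist l := by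
  simpa using update_sublist ([] : List α) l

-- the getD of the by_cnt-building fold: keys of matching pairs, in input order, as a Set.update
theorem getD_buildFold (l : List (String × Int)) (d : PySem.Dict Int (PySem.Set String)) (c : Int) :
    (l.foldl (fun d p => d.modify p.2 PySem.Set.empty (fun s => PySem.Set.add s p.1)) d).getD c PySem.Set.empty
      = PySem.Set.update (d.getD c PySem.Set.empty) ((l.filter (fun p => p.2 == c)).map (fun p => p.1)) := by
  induction l generalizing d with
  | nil => rfl
  | cons p t ih =>
    simp only [List.foldl_cons, List.filter_cons]
    rw [ih]
    by_cases hc : p.2 = c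
    · subst hc
      rw [PySem.Dict.getD_modify]
      simp [PySem.Set.update]
    · rw [PySem.Dict.getD_modify]
      simp [hc, Ne.symm hc]

-- insertBy splits the list at the first element the new one must precede
theorem insertBy_split {α : Type} (bef : α → α → Bool) (x : α) (ys : List α) :
    PySem.List.insertBy bef x ys
      = ys.takeWhile (fun y => !bef x y) ++ x :: ys.dropWhile (fun y => !bef x y) := by
  induction ys with
  | nil => rfl
  | cons y t ih =>
    by_cases h : bef x y <;> simp [PySem.List.insertBy, h, ih]

-- in a descending list, everything past the first element below x.2 stays below x.2
theorem dropWhile_lt (x2 : Int) (l : List (String × Int))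
    (hp : l.Pairwise (fun a b => b.2 ≤ a.2)) :
    ∀ y ∈ l.dropWhile (fun y => !decide (y.2 < x2)), y.2 < x2 := by
  induction l with
  | nil => simp
  | cons a t ih =>
    intro y hy
    rw [List.dropWhile_cons] at hy
    by_cases h : a.2 < x2
    · simp [h] at hy
      rcases hy with h' | h'
      · subst h'; exact h
      · exact lt_of_le_of_lt (List.rel_of_pairwise_cons hp h') h
    · simp [h] at hy
      exact ih hp.tail y hy

-- stability at one insertion step: filtering a count class commutes with insertBy into a descending list
theorem filter_insertBy (c : Int) (x : String × Int) (acc : List (String × Int))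
    (hp : acc.Pairwise (fun a b => b.2 ≤ a.2)) :
    (PySem.List.insertBy (fun a b => decide (b.2 < a.2)) x acc).filter (fun p => p.2 == c)
      = acc.filter (fun p => p.2 == c) ++ if x.2 == c then [x] else [] := by
  rw [insertBy_split]
  rw [List.filter_append, List.filter_cons]
  conv_rhs => rw [← List.takeWhile_append_dropWhile
    (p := fun y => !decide (y.2 < x.2)) (l := acc), List.filter_append]
  by_cases hx : x.2 = c
  · subst hx
    have hd : (acc.dropWhile (fun y => !decide (y.2 < x.2))).filter (fun p => p.2 == x.2) = [] := by
      rw [List.filter_eq_nil_iff]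
      intro y hy
      have := dropWhile_lt x.2 acc hp y hy
      simp; omega
    rw [hd]
    simp
  · simp [hx]

-- stability of the full sort: each count class keeps its original order
theorem filter_sorted (xs : List (String × Int)) (c : Int) :
    (PySem.List.sorted xs (fun kv => kv.2) true).filter (fun p => p.2 == c)
      = xs.filter (fun p => p.2 == c) := by
  induction xs using List.reverseRecOn with
  | nil => rfl
  | append_singleton t x ih =>
    have hstep : PySem.List.sorted (t ++ [x]) (fun kv => kv.2) true
        = PySem.List.insertBy (fun a b => decide (b.2 < a.2)) x
            (PySem.List.sorted t (fun kv => kv.2) true) := by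
      rw [PySem.List.sorted_rev_eq_foldl_insertBy, PySem.List.sorted_rev_eq_foldl_insertBy]
      simp
    rw [hstep, filter_insertBy c x _ (PySem.List.sorted_pairwise_rev t (fun kv => kv.2)),
      ih, List.filter_append, List.filter_cons]
    simp

-- Set.update by elements already present is the identity
theorem update_subset_self {α : Type} [BEq α] [LawfulBEq α] (s : List α) (m : List α)
    (h : ∀ x ∈ m, x ∈ s) : PySem.Set.update s m = s := by
  induction m with
  | nil => rfl
  | cons x t ih =>
    have hx : PySem.Set.add s x = s := by
      simp [PySem.Set.add, PySem.Set.contains, h x (by simp)]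
    simp only [PySem.Set.update, List.foldl_cons, hx] at *
    exact ih (fun y hy => h y (by simp [hy]))

-- past the run of count v, a descending list bounded by v stays strictly below v
theorem dropWhile_run_lt (v : Int) (t : List (String × Int))
    (hp : t.Pairwise (fun a b => b.2 ≤ a.2)) (hb : ∀ p ∈ t, p.2 ≤ v) :
    ∀ p ∈ t.dropWhile (fun p => p.2 == v), p.2 < v := by
  induction t with
  | nil => simp
  | cons a r ih =>
    intro p hpmem
    rw [List.dropWhile_cons] at hpmem
    by_cases h : a.2 = v
    · simp [h] at hpmem
      exact ih hp.tail (fun q hq => hb q (by simp [hq])) p hpmem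
    · simp [h] at hpmem
      rcases hpmem with h' | h'
      · subst h'; exact lt_of_le_of_ne (hb p (by simp)) h
      · exact lt_of_le_of_lt (List.rel_of_pairwise_cons hp h')
          (lt_of_le_of_ne (hb a (by simp)) h)

-- the grouping pass over any descending list, in closed form
theorem groupRuns_eq (s : List (String × Int)) (hp : s.Pairwise (fun a b => b.2 ≤ a.2)) :
    groupRuns s
      = (PySem.Set.ofList (s.map (fun p => p.2))).map
          (fun c => (s.filter (fun p => p.2 == c)).map (fun p => p.1)) := by
  match s with
  | [] => rw [groupRuns]; rfl
  | (k, v) :: t =>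
    set T := t.takeWhile (fun p => p.2 == v) with hTdef
    set D := t.dropWhile (fun p => p.2 == v) with hDdef
    have htTD : t = T ++ D := (List.takeWhile_append_dropWhile).symm
    have hT : ∀ p ∈ T, p.2 = v := by
      intro p hpm
      have := List.mem_takeWhile_imp hpm
      simpa using this
    have hb : ∀ p ∈ t, p.2 ≤ v := by
      intro p hpm
      exact List.rel_of_pairwise_cons hp hpm
    have hD : ∀ p ∈ D, p.2 < v := dropWhile_run_lt v t hp.tail hb
    have hDpw : D.Pairwise (fun a b => b.2 ≤ a.2) :=
      hp.tail.sublist (List.dropWhile_sublist _)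
    have IH := groupRuns_eq D hDpw
    -- left side unfolds to the head run and the recursive call
    have hgr : groupRuns ((k, v) :: t)
        = ((k, v) :: T).map (fun p => p.1) :: groupRuns D := by
      rw [groupRuns]
    -- the distinct counts: v then the distinct counts of D
    have hofl : PySem.Set.ofList (((k, v) :: t).map (fun p => p.2))
        = v :: PySem.Set.ofList (D.map (fun p => p.2)) := by
      have h1 : ((k, v) :: t).map (fun p => p.2)
          = v :: (T.map (fun p => p.2) ++ D.map (fun p => p.2)) := by
        simp [htTD]
      rw [h1]
      show PySem.Set.update PySem.Set.empty (v :: (T.map (fun p => p.2) ++ D.map (fun p => p.2)))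
        = v :: PySem.Set.ofList (D.map (fun p => p.2))
      have h2 : PySem.Set.update PySem.Set.empty (v :: (T.map (fun p => p.2) ++ D.map (fun p => p.2)))
          = PySem.Set.update (PySem.Set.update [v] (T.map (fun p => p.2))) (D.map (fun p => p.2)) := by
        simp [PySem.Set.update, PySem.Set.add, PySem.Set.empty, PySem.Set.contains]
      rw [h2, update_subset_self [v] _ (by intro x hx; rcases List.mem_map.mp hx with ⟨p, hpm, rfl⟩; simp [hT p hpm]),
        update_cons_of_not_mem v [] _ (by intro x hx; rcases List.mem_map.mp hx with ⟨p, hpm, rfl⟩; exact ne_of_lt (hD p hpm))]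
      rfl
    rw [hgr, IH, hofl, List.map_cons]
    congr 1
    · -- the bucket at v is exactly the head run
      have hfD : D.filter (fun p => p.2 == v) = [] := by
        rw [List.filter_eq_nil_iff]
        intro p hpm
        simp [ne_of_lt (hD p hpm)]
      have hfT : T.filter (fun p => p.2 == v) = T :=
        List.filter_eq_self.mpr (fun p hpm => by simp [hT p hpm])
      simp [htTD, List.filter_append, hfD, hfT]
    · -- below v the head run contributes nothing to any bucket
      apply List.map_congr_left
      intro c hc
      have hcv : c < v := by
        rcases List.mem_map.mp ((PySem.Set.mem_ofList _ _).mp hc) with ⟨p, hpm, rfl⟩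
        exact hD p hpm
      have hfT : T.filter (fun p => p.2 == c) = [] := by
        rw [List.filter_eq_nil_iff]
        intro p hpm
        simp [hT p hpm]; omega
      simp [htTD, List.filter_append, hfT, ne_of_gt hcv]
  termination_by s.length
  decreasing_by
    exact Nat.lt_succ_of_le (List.length_dropWhile_le _ _)

-- the whole equivalence, for any items list with distinct keys
theorem buckets_main (l : List (String × Int)) (hnd : (l.map (fun p => p.1)).Nodup) :
    (if (l.foldl (fun d p => d.modify p.2 PySem.Set.empty (fun s => PySem.Set.add s p.1)) PySem.Dict.empty).items.isEmpty
     then []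
     else (PySem.List.sorted (l.foldl (fun d p => d.modify p.2 PySem.Set.empty (fun s => PySem.Set.add s p.1)) PySem.Dict.empty).keys (fun c => c) true).map
            (fun c => (l.foldl (fun d p => d.modify p.2 PySem.Set.empty (fun s => PySem.Set.add s p.1)) PySem.Dict.empty).getD c PySem.Set.empty))
    = groupRuns (PySem.List.sorted l (fun kv => kv.2) true) := by
  set byCnt := l.foldl (fun d p => d.modify p.2 PySem.Set.empty (fun s => PySem.Set.add s p.1)) PySem.Dict.empty with hB
  have hkeys : byCnt.keys = PySem.Set.ofList (l.map (fun p => p.2)) := by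
    rw [hB, PySem.Dict.keys_foldl_modify_key l (fun p => p.2) PySem.Set.empty
      (fun d p => fun s => PySem.Set.add s p.1) PySem.Dict.empty]
    rfl
  rcases l with _ | ⟨p0, t0⟩
  · rw [show PySem.List.sorted ([] : List (String × Int)) (fun kv => kv.2) true = [] from rfl,
      show groupRuns [] = [] from by rw [groupRuns]]
    rfl
  · have hne : byCnt.items.isEmpty = false := by
      have hv : p0.2 ∈ byCnt.keys := by
        rw [hkeys, PySem.Set.mem_ofList]
        exact List.mem_map.mpr ⟨p0, by simp, rfl⟩
      rcases List.mem_map.mp hv with ⟨q, hq, _⟩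
      cases h0 : byCnt.items with
      | nil => rw [h0] at hq; simp at hq
      | cons a r => simp
    rw [if_neg (by simp [hne])]
    have hA : ∀ c, byCnt.getD c PySem.Set.empty
        = PySem.Set.ofList (((p0 :: t0).filter (fun p => p.2 == c)).map (fun p => p.1)) := by
      intro c
      rw [hB, getD_buildFold, PySem.Dict.getD_empty]
      rfl
    have hfsub : ∀ c, (((p0 :: t0).filter (fun p => p.2 == c)).map (fun p => p.1)).Nodup :=
      fun c => hnd.sublist (List.Sublist.map _ List.filter_sublist)
    have hlevels : PySem.List.sorted byCnt.keys (fun c => c) true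
        = PySem.Set.ofList ((PySem.List.sorted (p0 :: t0) (fun kv => kv.2) true).map (fun p => p.2)) := by
      rw [hkeys]
      apply PySem.List.sorted_rev_eq_of_perm_of_pairwise_gt
      · apply (List.perm_ext_iff_of_nodup (PySem.Set.nodup_ofList _) (PySem.Set.nodup_ofList _)).mpr
        intro x
        rw [PySem.Set.mem_ofList, PySem.Set.mem_ofList]
        exact ((PySem.List.sorted_perm (p0 :: t0) (fun kv => kv.2) true).map (fun p => p.2)).mem_iff
      · have h1 : ((PySem.List.sorted (p0 :: t0) (fun kv => kv.2) true).map (fun p => p.2)).Pairwise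
            (fun a b => b ≤ a) :=
          List.Pairwise.map _ (fun _ _ h => h) (PySem.List.sorted_pairwise_rev (p0 :: t0) (fun kv => kv.2))
        have h2 : (PySem.Set.ofList ((PySem.List.sorted (p0 :: t0) (fun kv => kv.2) true).map (fun p => p.2))).Pairwise
            (fun a b => a ≠ b) := PySem.Set.nodup_ofList _
        exact ((h1.sublist (ofList_sublist _)).and h2).imp
          (fun h => lt_of_le_of_ne h.1 (Ne.symm h.2))
    rw [hlevels, groupRuns_eq _ (PySem.List.sorted_pairwise_rev (p0 :: t0) (fun kv => kv.2))]
    apply List.map_congr_left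
    intro c _
    rw [filter_sorted, hA, PySem.Set.ofList_eq_self_of_nodup _ (hfsub c)]

-- ===== VERDICT (by name: the statement is the Claim_ definition above) =====
theorem rank_buckets_spec : Claim_equal_rank_buckets := by
  intro counts _
  show rank_buckets counts = rank_buckets_alt counts
  have hnd : (((PySem.Dict.ofList counts).items).map (fun p => p.1)).Nodup := by
    have h := PySem.Dict.nodup_keys_foldl_insert_key counts (fun p => p.1)
      (fun d p => p.2) PySem.Dict.empty (by simp [PySem.Dict.empty, PySem.Dict.keys])
    exact h
  exact buckets_main _ hnd
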